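-- pv_equiv track=rewrite | github.com/Klyah98/my_functions | positive_augmentation.py | two_zero_augmentation
-- ===== SOURCE A (Python) =====
-- def two_zero_augmentation(string):
--     if string[-1] == '0':
--         previous_was_zero = True
--     else:
--         previous_was_zero = False
--     aug = []
--     string_indices = range(len(string) - 1, -1, -1)
--     for i in string_indices:
--         if string[i] == '0':
--             previous_was_zero = True
--         else:
--             if previous_was_zero:
--                 aug.append(string[:i + 1] + '00' + string[i + 1:])
--                 previous_was_zero = False
--     if previous_was_zero:
--         aug.append('00' + string)
--     return aug
-- ===== SOURCE B (Python) =====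
-- def two_zero_augmentation(string):
--     out = []
--     i = 0
--     n = len(string)
--     while i < n:
--         if string[i] != '0':
--             i += 1
--             continue
--         out.append(string[:i] + '00' + string[i:])
--         while i < n and string[i] == '0':
--             i += 1
--     out.reverse()
--     return out
-- ===== Notes on version B (the rewrite author's own statement) =====
-- stated objective: alternative
-- what changed: A's single right-to-left scan carrying a previous_was_zero flag (with a special final append) is replaced by a left-to-right loop that peels off one maximal zero run at a time with an inner skip-the-run loop, appends each variant in ascending position order, and reverses the list at the end.
import Mathlib
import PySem

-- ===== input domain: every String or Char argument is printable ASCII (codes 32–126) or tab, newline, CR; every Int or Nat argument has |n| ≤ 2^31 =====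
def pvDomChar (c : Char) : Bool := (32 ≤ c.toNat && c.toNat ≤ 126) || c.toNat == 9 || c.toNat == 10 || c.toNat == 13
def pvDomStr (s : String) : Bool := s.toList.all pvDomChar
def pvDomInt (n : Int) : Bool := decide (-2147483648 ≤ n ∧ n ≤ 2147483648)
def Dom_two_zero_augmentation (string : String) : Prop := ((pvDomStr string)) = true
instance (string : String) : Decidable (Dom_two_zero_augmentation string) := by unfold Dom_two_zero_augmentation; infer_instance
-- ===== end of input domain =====

-- B replaces A's reverse flag-carrying scan by a left-to-right loop that peels off one maximal
-- zero run at a time with an inner skip-the-run loop, collects the variants in ascending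
-- position order and reverses at the end (objective: alternative decomposition; Pre_ excludes
-- "" where A raises IndexError).


-- ===== PORT A =====
-- loop body of A's for-loop (the same state: the previous_was_zero flag and the aug list)
def twoZeroStep (s : List Char) (st : Bool × List String) (i : Int) : Bool × List String :=
  if PySem.List.pyGetD s i ' ' == '0' then (true, st.2)
  else if st.1 then
    (false, st.2 ++ [String.ofList (PySem.List.slice s none (some (i + 1)) ++ ['0', '0'] ++ PySem.List.slice s (some (i + 1)) none)])
  else st

def two_zero_augmentation (string : String) : List String :=
  let s := string.toList
  -- string[-1] raises IndexError on "" (excluded by Pre_); total form pyGetD used under that Pre_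
  let previous_was_zero := PySem.List.pyGetD s (-1) ' ' == '0'
  let res := (PySem.List.pyRange ((s.length : Int) - 1) (-1) (-1)).foldl (twoZeroStep s) (previous_was_zero, [])
  if res.1 then res.2 ++ [String.ofList (['0', '0'] ++ s)] else res.2

-- ===== PORT B =====
-- the inner `while j < len(string) and string[j] == '0': j += 1` of Source B
def twoZeroRunEnd (s : List Char) (j : Nat) : Nat :=
  if h : j < s.length then
    if s[j] = '0' then twoZeroRunEnd s (j + 1) else j
  else j
termination_by s.length - j

-- termination facts for the port's recursion (cited in decreasing_by)
theorem twoZeroRunEnd_ge (s : List Char) (i : Nat) : i ≤ twoZeroRunEnd s i := by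
  fun_induction twoZeroRunEnd s i <;> omega

theorem twoZeroRunEnd_gt (s : List Char) (i : Nat) (h : i < s.length) (hz : s[i] = '0') :
    i < twoZeroRunEnd s i := by
  rw [twoZeroRunEnd, dif_pos h, if_pos hz]
  have := twoZeroRunEnd_ge s (i + 1)
  omega

-- the outer `while i < n` loop of Source B, over the same state (i, out)
def twoZeroLoop (s : List Char) (i : Nat) (out : List String) : List String :=
  if h : i < s.length then
    if s[i] ≠ '0' then twoZeroLoop s (i + 1) out
    else
      twoZeroLoop s (twoZeroRunEnd s i)
        (out ++ [String.ofList (PySem.List.slice s none (some (i : Int)) ++ ['0', '0'] ++ PySem.List.slice s (some (i : Int)) none)])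
  else out
termination_by s.length - i
decreasing_by
  · omega
  · have := twoZeroRunEnd_gt s i (by omega) (by simpa using ‹¬ s[i] ≠ '0'›)
    omega

def two_zero_augmentation_alt (string : String) : List String :=
  (twoZeroLoop string.toList 0 []).reverse

-- ===== PRECONDITION & SPEC =====
-- Pre_ excludes only the empty string, on which A raises IndexError at string[-1].
def Pre_two_zero_augmentation (string : String) : Prop := string ≠ ""
instance (string : String) : Decidable (Pre_two_zero_augmentation string) := by unfold Pre_two_zero_augmentation; infer_instance
def pvWitness_two_zero_augmentation : String := "10"

def Spec_two_zero_augmentation (string : String) (out : List String) : Prop := out = two_zero_augmentation_alt string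
instance (string : String) (out : List String) : Decidable (Spec_two_zero_augmentation string out) := by unfold Spec_two_zero_augmentation; infer_instance

-- ===== CLAIM (what is proved, stated in full; the proofs are below) =====
def Claim_equal_two_zero_augmentation : Prop := ∀ (string : String), Dom_two_zero_augmentation string → Pre_two_zero_augmentation string → Spec_two_zero_augmentation string (two_zero_augmentation string)

-- ===== LEMMAS AND PROOFS =====
-- zb s j: "position j exists in s and holds '0'"
-- insAt s p: the variant with '00' inserted at position p
-- extrasZ s j: the insertions A's loop has emitted after scanning indices j-1 .. 0
-- startsFrom s i: the zero-run start positions ≥ i, in ascending order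
def zb (s : List Char) (j : Nat) : Bool := s[j]? == some '0'
def insAt (s : List Char) (p : Nat) : String :=
  String.ofList (PySem.List.slice s none (some (p : Int)) ++ ['0', '0'] ++ PySem.List.slice s (some (p : Int)) none)
def extrasZ (s : List Char) (j : Nat) : List String :=
  (((List.range j).filter (fun i => zb s (i + 1) && !(zb s i))).reverse.map (fun i => insAt s (i + 1)))
def startsFrom (s : List Char) (i : Nat) : List Nat :=
  (List.range' i (s.length - i)).filter (fun p => zb s p && (decide (p = 0) || !(zb s (p - 1))))

theorem zb_cond (s : List Char) (j : Nat) (hj : j < s.length) :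
    (PySem.List.pyGetD s (j : Int) ' ' == '0') = zb s j := by
  simp [zb, PySem.List.pyGetD_natCast, List.getElem?_eq_getElem hj]

theorem extrasZ_succ (s : List Char) (j : Nat) :
    extrasZ s (j+1) = (if (zb s (j+1) && !zb s j) = true then [insAt s (j+1)] else []) ++ extrasZ s j := by
  unfold extrasZ
  rw [List.range_succ, List.filter_append]
  by_cases h : (zb s (j+1) && !zb s j) = true <;> simp [h]

theorem loopA_eq (s : List Char) (j : Nat) (hj : j < s.length) (acc : List String) :
    (PySem.List.pyRange ((j : Int) - 1) (-1) (-1)).foldl (twoZeroStep s) (zb s j, acc)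
      = (zb s 0, acc ++ extrasZ s j) := by
  induction j generalizing acc with
  | zero =>
      rw [PySem.List.pyRange_neg_one_eq_nil (by omega)]
      simp [extrasZ]
  | succ j ih =>
      have hj' : j < s.length := by omega
      have hc : ((j+1 : Nat) : Int) - 1 = (j : Int) := by push_cast; ring
      rw [hc, PySem.List.pyRange_neg_one_cons (by omega : (-1:Int) < (j:Nat)), List.foldl_cons,
        extrasZ_succ]
      cases h0 : zb s j with
      | true =>
          have hstep : twoZeroStep s (zb s (j+1), acc) (j : Int) = (zb s j, acc) := by
            unfold twoZeroStep
            rw [zb_cond s j hj', h0]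
            simp
          rw [hstep, ih hj' acc]
          simp
      | false =>
          cases h1 : zb s (j+1) with
          | true =>
              have hc2 : (j : Int) + 1 = ((j+1 : Nat) : Int) := by push_cast; ring
              have hstep : twoZeroStep s (zb s (j+1), acc) (j : Int)
                  = (zb s j, acc ++ [insAt s (j+1)]) := by
                unfold twoZeroStep
                rw [zb_cond s j hj', h0, h1, hc2]
                simp [insAt]
              rw [h1] at hstep
              rw [hstep, ih hj' (acc ++ [insAt s (j+1)])]
              simp
          | false =>
              have hstep : twoZeroStep s (zb s (j+1), acc) (j : Int) = (zb s j, acc) := by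
                unfold twoZeroStep
                rw [zb_cond s j hj', h0, h1]
                simp
              rw [h1] at hstep
              rw [hstep, ih hj' acc]
              simp

theorem insAt_zero (s : List Char) : insAt s 0 = String.ofList (['0', '0'] ++ s) := by
  simp [insAt, pysem]

theorem portA_eq (s : List Char) (h : s ≠ []) :
    two_zero_augmentation (String.ofList s)
      = extrasZ s (s.length - 1) ++ (if zb s 0 then [insAt s 0] else []) := by
  have hn : 0 < s.length := List.length_pos_iff.mpr h
  have hm : s.length - 1 < s.length := by omega
  unfold two_zero_augmentation
  simp only [String.toList_ofList]
  have hprev : (PySem.List.pyGetD s (-1) ' ' == '0') = zb s (s.length - 1) := by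
    rw [PySem.List.pyGetD_neg_one s ' ' h]
    simp [zb, List.getLast_eq_getElem, List.getElem?_eq_getElem hm]
  have hc : ((s.length : Int) - 1) = ((s.length - 1 : Nat) : Int) := by omega
  rw [hc, PySem.List.pyRange_neg_one_cons (by omega : (-1:Int) < ((s.length - 1 : Nat) : Int)),
    List.foldl_cons]
  have hstep : twoZeroStep s (PySem.List.pyGetD s (-1) ' ' == '0', []) ((s.length - 1 : Nat) : Int)
      = (zb s (s.length - 1), []) := by
    unfold twoZeroStep
    rw [zb_cond s _ hm, hprev]
    cases hz : zb s (s.length - 1) <;> simp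
  rw [hstep, loopA_eq s (s.length - 1) hm []]
  cases hz0 : zb s 0 <;> simp [insAt_zero]

-- run-end characterisation
theorem runEnd_le (s : List Char) (i : Nat) (h : i ≤ s.length) : twoZeroRunEnd s i ≤ s.length := by
  fun_induction twoZeroRunEnd s i <;> omega

theorem runEnd_zeros (s : List Char) (i : Nat) :
    ∀ p, i ≤ p → p < twoZeroRunEnd s i → zb s p = true := by
  fun_induction twoZeroRunEnd s i with
  | case1 j h hz ih =>
      intro p hp1 hp2
      rcases Nat.eq_or_lt_of_le hp1 with rfl | hlt
      · simp [zb, List.getElem?_eq_getElem h, hz]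
      · exact ih p hlt hp2
  | case2 j h hz => intro p hp1 hp2; omega
  | case3 j h => intro p hp1 hp2; omega

theorem runEnd_not_zero (s : List Char) (i : Nat) : zb s (twoZeroRunEnd s i) = false := by
  fun_induction twoZeroRunEnd s i with
  | case1 j h hz ih => exact ih
  | case2 j h hz => simp [zb, List.getElem?_eq_getElem h, hz]
  | case3 j h =>
      have : s[j]? = none := List.getElem?_eq_none (by omega)
      simp [zb, this]

theorem loopB_eq (s : List Char) : ∀ (k i : Nat) (out : List String), s.length - i ≤ k →
    (i = 0 ∨ s.length ≤ i ∨ zb s i = false ∨ zb s (i - 1) = false) →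
    twoZeroLoop s i out = out ++ (startsFrom s i).map (fun p => insAt s p) := by
  intro k
  induction k with
  | zero =>
      intro i out hk _
      rw [twoZeroLoop, dif_neg (by omega)]
      simp [startsFrom, Nat.sub_eq_zero_of_le (by omega : s.length ≤ i)]
  | succ k ih =>
      intro i out hk hH
      by_cases h : i < s.length
      · by_cases hz : s[i] = '0'
        · -- zero-run case
          have hzb : zb s i = true := by simp [zb, List.getElem?_eq_getElem h, hz]
          rw [twoZeroLoop, dif_pos h, if_neg (by simp [hz])]
          set j := twoZeroRunEnd s i with hj
          have hij : i < j := twoZeroRunEnd_gt s i h hz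
          have hjl : j ≤ s.length := runEnd_le s i (by omega)
          have hrec : ∀ out', twoZeroLoop s j out' = out' ++ (startsFrom s j).map (fun p => insAt s p) := by
            intro out'
            apply ih j out' (by omega)
            right; right; left; exact runEnd_not_zero s i
          have hsplit : startsFrom s i = i :: startsFrom s j := by
            unfold startsFrom
            have h1 : s.length - i = (j - i) + (s.length - j) := by omega
            rw [h1, ← List.range'_append_1, List.filter_append]
            have h2 : i + (j - i) = j := by omega
            rw [h2]
            have h3 : j - i = (j - i - 1) + 1 := by omega
            have h4 : (List.range' i (j - i)).filter (fun p => zb s p && (decide (p = 0) || !(zb s (p - 1)))) = [i] := by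
              rw [h3, List.range'_succ, List.filter_cons]
              have hhead : (zb s i && (decide (i = 0) || !(zb s (i - 1)))) = true := by
                rcases hH with rfl | hH | hH | hH
                · simp [hzb]
                · omega
                · rw [hzb] at hH; exact absurd hH (by simp)
                · simp [hzb, hH]
              rw [if_pos hhead]
              have htail : (List.range' (i + 1) (j - i - 1)).filter (fun p => zb s p && (decide (p = 0) || !(zb s (p - 1)))) = [] := by
                rw [List.filter_eq_nil_iff]
                intro p hp
                have hp' := List.mem_range'_1.mp hp
                have hzp : zb s (p - 1) = true := runEnd_zeros s i (p - 1) (by omega) (by omega)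
                simp [hzp]
                intro _
                omega
              rw [htail]
            rw [h4]
            rfl
          rw [hrec, hsplit]
          simp [insAt, PySem.List.slice_to_natCast, PySem.List.slice_from_natCast]
        · -- non-zero head: advance
          have hzb : zb s i = false := by simp [zb, List.getElem?_eq_getElem h, hz]
          rw [twoZeroLoop, dif_pos h, if_pos (by simp [hz])]
          have hrec := ih (i + 1) out (by omega) (by right; right; right; simpa using hzb)
          rw [hrec]
          have hsame : startsFrom s i = startsFrom s (i + 1) := by
            unfold startsFrom
            have h1 : s.length - i = (s.length - (i + 1)) + 1 := by omega
            rw [h1, List.range'_succ, List.filter_cons, if_neg (by simp [hzb])]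
          rw [hsame]
      · rw [twoZeroLoop, dif_neg h]
        simp [startsFrom, Nat.sub_eq_zero_of_le (by omega : s.length ≤ i)]

theorem sliceTo1 (s : List Char) (a : Nat) :
    PySem.List.slice s none (some ((a : Int) + 1)) = s.take (a + 1) := by
  rw [show ((a : Int) + 1) = ((a + 1 : Nat) : Int) by push_cast; ring, PySem.List.slice_to_natCast]

theorem sliceFrom1 (s : List Char) (a : Nat) :
    PySem.List.slice s (some ((a : Int) + 1)) none = s.drop (a + 1) := by
  rw [show ((a : Int) + 1) = ((a + 1 : Nat) : Int) by push_cast; ring, PySem.List.slice_from_natCast]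

theorem altB_eq (s : List Char) (h : s ≠ []) :
    two_zero_augmentation_alt (String.ofList s)
      = extrasZ s (s.length - 1) ++ (if zb s 0 then [insAt s 0] else []) := by
  have hn : 0 < s.length := List.length_pos_iff.mpr h
  obtain ⟨m, hm⟩ : ∃ m, s.length = m + 1 := ⟨s.length - 1, by omega⟩
  unfold two_zero_augmentation_alt
  simp only [String.toList_ofList]
  rw [loopB_eq s s.length 0 [] (by omega) (Or.inl rfl), List.nil_append, ← List.map_reverse]
  have hsf : startsFrom s 0 = (List.range s.length).filter (fun i => if i = 0 then zb s 0 else (zb s i && !(zb s (i-1)))) := by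
    unfold startsFrom
    rw [Nat.sub_zero, ← List.range_eq_range']
    apply List.filter_congr
    intro p _
    by_cases hp : p = 0 <;> simp [hp]
  rw [hsf, hm]
  rw [show m + 1 - 1 = m from rfl]
  rw [List.range_succ_eq_map, List.filter_cons, List.filter_map]
  have hcomp : ((fun i => if i = 0 then zb s 0 else (zb s i && !(zb s (i-1)))) ∘ Nat.succ)
      = (fun i => zb s (i+1) && !(zb s i)) := by
    funext i
    simp [Nat.succ_eq_add_one]
  rw [hcomp]
  have h00 : PySem.List.slice s none (some (0 : Int)) = ([] : List Char) := by
    rw [show (0 : Int) = ((0 : Nat) : Int) from rfl, PySem.List.slice_to_natCast]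
    simp
  cases hz0 : zb s 0 <;>
    simp [h00, extrasZ, insAt, List.map_reverse, List.map_map, Nat.succ_eq_add_one, Function.comp,
      sliceTo1, sliceFrom1, PySem.List.slice_to_natCast, PySem.List.slice_from_natCast]

-- ===== VERDICT (by name: the statement is the Claim_ definition above) =====
theorem two_zero_augmentation_spec : Claim_equal_two_zero_augmentation := by
  intro string _ hpre
  unfold Spec_two_zero_augmentation
  have h : string.toList ≠ [] := by
    intro h0
    apply hpre
    have := congrArg String.ofList h0
    simpa [String.ofList_toList] using this
  have hs : string = String.ofList string.toList := String.ofList_toList.symm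
  rw [hs, portA_eq _ h, altB_eq _ h]
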